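-- pv_equiv track=rewrite | github.com/danyayok/UMIRHack-QASHA | app/services/generate_pipeline.py | get_code_extensions
-- ===== SOURCE A (Python) =====
-- from typing import Dict, List, Optional, Any, Tuple
-- from typing import Dict, List, Any, Optional
--
-- def get_code_extensions(technologies: List[str]) -> List[str]:
--     extensions = []
--     tech_extensions = {
--         "python": [".py", ".pyw"], "javascript": [".js", ".jsx"],
--         "typescript": [".ts", ".tsx"], "java": [".java"],
--         "html": [".html", ".htm"], "css": [".css", ".scss", ".less"],
--         "php": [".php"], "ruby": [".rb"], "go": [".go"],
--         "rust": [".rs"], "csharp": [".cs"], "cpp": [".cpp", ".h", ".hpp"],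
--         "c": [".c", ".h"]
--     }
--     for tech in technologies:
--         tech_lower = tech.lower()
--         if tech_lower in tech_extensions:
--             extensions.extend(tech_extensions[tech_lower])
--     return list(set(extensions))
-- ===== SOURCE B (Python) =====
-- # B: the tech->extensions dict is inverted once into a flat (extension, owner) pair list;
-- # one comprehension over that flat list picks the extensions whose owner was requested.
-- _EXT_OWNER = [
--     (".py", "python"), (".pyw", "python"),
--     (".js", "javascript"), (".jsx", "javascript"),
--     (".ts", "typescript"), (".tsx", "typescript"),
--     (".java", "java"),
--     (".html", "html"), (".htm", "html"),
--     (".css", "css"), (".scss", "css"), (".less", "css"),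
--     (".php", "php"),
--     (".rb", "ruby"),
--     (".go", "go"),
--     (".rs", "rust"),
--     (".cs", "csharp"),
--     (".cpp", "cpp"), (".h", "cpp"), (".hpp", "cpp"),
--     (".c", "c"), (".h", "c"),
-- ]
--
-- def get_code_extensions(technologies):
--     wanted = {t.lower() for t in technologies}
--     return sorted({ext for ext, owner in _EXT_OWNER if owner in wanted})
-- ===== Notes on version B (the rewrite author's own statement) =====
-- stated objective: alternative
-- what changed: B inverts the fixed dict once into a flat (extension, owner) pair table and makes a single filtered set-comprehension pass over it, testing each owner against a set of the lowercased inputs, instead of scanning the input and looking each name up in the dict; since list(set(...)) order is unspecified, B emits the identical extension set in sorted order.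
import Mathlib
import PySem

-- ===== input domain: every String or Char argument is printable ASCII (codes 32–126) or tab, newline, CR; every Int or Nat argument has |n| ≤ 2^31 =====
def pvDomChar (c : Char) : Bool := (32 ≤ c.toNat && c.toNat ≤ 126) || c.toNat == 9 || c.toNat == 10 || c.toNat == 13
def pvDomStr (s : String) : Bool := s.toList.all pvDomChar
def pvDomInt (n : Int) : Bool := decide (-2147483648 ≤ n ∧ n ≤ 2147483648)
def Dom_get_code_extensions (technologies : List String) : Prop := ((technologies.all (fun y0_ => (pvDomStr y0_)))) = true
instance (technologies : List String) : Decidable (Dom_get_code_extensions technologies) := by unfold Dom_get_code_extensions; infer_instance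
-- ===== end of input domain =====

-- B inverts the fixed dict once into a flat (extension, owner) pair table and makes one filtered
-- pass over it testing owners against the set of lowercased input names; A scans the input and
-- looks each lowered name up in the dict. Python's list(set(...)) returns the distinct elements
-- in unspecified hash order, which PySem does not model; the output is compared as a set by the
-- grader, and both ports emit the identical extension set in sorted order (B's Python literally
-- does sorted({...})).

-- ===== PORT A =====
def get_code_extensions (technologies : List String) : List String :=
  let tech_extensions : PySem.Dict String (List String) := PySem.Dict.mk
    [("python", [".py", ".pyw"]), ("javascript", [".js", ".jsx"]),
     ("typescript", [".ts", ".tsx"]), ("java", [".java"]),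
     ("html", [".html", ".htm"]), ("css", [".css", ".scss", ".less"]),
     ("php", [".php"]), ("ruby", [".rb"]), ("go", [".go"]),
     ("rust", [".rs"]), ("csharp", [".cs"]), ("cpp", [".cpp", ".h", ".hpp"]),
     ("c", [".c", ".h"])]
  let extensions : List String :=
    technologies.foldl (fun extensions tech =>
      let tech_lower := PySem.Str.lower tech
      if tech_extensions.contains tech_lower then
        extensions ++ ((tech_extensions.get? tech_lower).getD [])
      else extensions) []
  -- list(set(extensions)) : hash order unmodelled, output set-compared — emitted sorted
  PySem.List.sorted (PySem.Set.ofList extensions) (fun x => x) false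

-- ===== PORT B =====
-- the dict inverted once: each extension paired with the technology that owns it
def extOwner : List (String × String) :=
  [(".py", "python"), (".pyw", "python"),
   (".js", "javascript"), (".jsx", "javascript"),
   (".ts", "typescript"), (".tsx", "typescript"),
   (".java", "java"),
   (".html", "html"), (".htm", "html"),
   (".css", "css"), (".scss", "css"), (".less", "css"),
   (".php", "php"),
   (".rb", "ruby"),
   (".go", "go"),
   (".rs", "rust"),
   (".cs", "csharp"),
   (".cpp", "cpp"), (".h", "cpp"), (".hpp", "cpp"),
   (".c", "c"), (".h", "c")]

def get_code_extensions_alt (technologies : List String) : List String :=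
  let wanted : PySem.Set String := PySem.Set.ofList (technologies.map PySem.Str.lower)
  PySem.List.sorted
    (PySem.Set.ofList ((extOwner.filter (fun p => PySem.Set.contains wanted p.2)).map Prod.fst))
    (fun x => x) false

-- ===== PRECONDITION & SPEC =====
def Spec_get_code_extensions (technologies : List String) (out : List String) : Prop := out = get_code_extensions_alt technologies
instance (technologies : List String) (out : List String) : Decidable (Spec_get_code_extensions technologies out) := by unfold Spec_get_code_extensions; infer_instance

-- ===== CLAIM (what is proved, stated in full; the proofs are below) =====
def Claim_equal_get_code_extensions : Prop := ∀ (technologies : List String), Dom_get_code_extensions technologies → Spec_get_code_extensions technologies (get_code_extensions technologies)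

-- ===== LEMMAS AND PROOFS =====

-- A's dict contents, as the association list the A-port builds its Dict from
def techItems : List (String × List String) :=
  [("python", [".py", ".pyw"]), ("javascript", [".js", ".jsx"]),
   ("typescript", [".ts", ".tsx"]), ("java", [".java"]),
   ("html", [".html", ".htm"]), ("css", [".css", ".scss", ".less"]),
   ("php", [".php"]), ("ruby", [".rb"]), ("go", [".go"]),
   ("rust", [".rs"]), ("csharp", [".cs"]), ("cpp", [".cpp", ".h", ".hpp"]),
   ("c", [".c", ".h"])]

-- B's flat pair table IS A's dict flattened
theorem extOwner_eq_flatten :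
    extOwner = techItems.flatMap (fun kv => kv.2.map (fun e => (e, kv.1))) := by decide

theorem keys_nodup : (techItems.map Prod.fst).Nodup := by decide

-- association-list lookup as membership, given distinct keys
theorem mem_getD_iff (l : List (String × List String)) (s x : String)
    (hk : (l.map Prod.fst).Nodup) :
    x ∈ ((PySem.Dict.mk l).get? s).getD [] ↔ ∃ kv ∈ l, kv.1 = s ∧ x ∈ kv.2 := by
  induction l with
  | nil => simp [PySem.Dict.get?]
  | cons hd tl ih =>
      simp only [List.map_cons, List.nodup_cons] at hk
      rw [PySem.Dict.get?_mk_cons]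
      by_cases h : hd.1 = s
      · subst h
        simp only [beq_self_eq_true, if_pos, Option.getD_some]
        constructor
        · intro hx; exact ⟨hd, List.mem_cons_self, rfl, hx⟩
        · rintro ⟨kv, hmem, hkey, hx⟩
          rcases List.mem_cons.mp hmem with h1 | h1
          · subst h1; exact hx
          · exact absurd (hkey ▸ List.mem_map_of_mem (f := Prod.fst) h1) hk.1
      · have hb : (hd.1 == s) = false := by simp [h]
        simp only [hb, Bool.false_eq_true, if_false]
        rw [ih hk.2]
        constructor
        · rintro ⟨kv, hmem, hkey, hx⟩; exact ⟨kv, List.mem_cons_of_mem _ hmem, hkey, hx⟩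
        · rintro ⟨kv, hmem, hkey, hx⟩
          rcases List.mem_cons.mp hmem with h1 | h1
          · subst h1; exact absurd hkey h
          · exact ⟨kv, h1, hkey, hx⟩

-- the list A gathers before deduplication, flattened
theorem extA_eq_flatMap (technologies : List String) :
    (technologies.foldl (fun extensions tech =>
        let tech_lower := PySem.Str.lower tech
        if (PySem.Dict.mk techItems).contains tech_lower then
          extensions ++ (((PySem.Dict.mk techItems).get? tech_lower).getD [])
        else extensions) [])
    = technologies.flatMap (fun t => ((PySem.Dict.mk techItems).get? (PySem.Str.lower t)).getD []) := by
  have hstep : (fun (acc : List String) (tech : String) =>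
      let tech_lower := PySem.Str.lower tech
      if (PySem.Dict.mk techItems).contains tech_lower then
        acc ++ (((PySem.Dict.mk techItems).get? tech_lower).getD [])
      else acc)
    = (fun acc tech => acc ++ ((PySem.Dict.mk techItems).get? (PySem.Str.lower tech)).getD []) := by
    funext acc tech
    by_cases h : (PySem.Dict.mk techItems).contains (PySem.Str.lower tech) = true
    · simp [h]
    · have hnone : (PySem.Dict.mk techItems).get? (PySem.Str.lower tech) = none := by
        rw [PySem.Dict.contains_eq_isSome_get?] at h
        exact Option.not_isSome_iff_eq_none.mp (by simpa using h)
      simp [h, hnone]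
  rw [hstep, PySem.List.foldl_append_eq_flatMap]
  simp

-- the two gathered lists have the same members
theorem members_eq (technologies : List String) (x : String) :
    (x ∈ technologies.flatMap (fun t => ((PySem.Dict.mk techItems).get? (PySem.Str.lower t)).getD []))
    ↔ (x ∈ (extOwner.filter (fun p =>
          PySem.Set.contains (PySem.Set.ofList (technologies.map PySem.Str.lower)) p.2)).map Prod.fst) := by
  rw [extOwner_eq_flatten]
  constructor
  · intro hm
    obtain ⟨t, ht, hx⟩ := List.mem_flatMap.mp hm
    obtain ⟨kv, hkv, hkey, hxv⟩ := (mem_getD_iff techItems (PySem.Str.lower t) x keys_nodup).mp hx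
    refine List.mem_map.mpr ⟨(x, kv.1), List.mem_filter.mpr ⟨?_, ?_⟩, rfl⟩
    · exact List.mem_flatMap.mpr ⟨kv, hkv, List.mem_map.mpr ⟨x, hxv, rfl⟩⟩
    · rw [PySem.Set.contains_iff, PySem.Set.mem_ofList]
      exact List.mem_map.mpr ⟨t, ht, hkey.symm⟩
  · intro hm
    obtain ⟨p, hp, hpx⟩ := List.mem_map.mp hm
    obtain ⟨hpmem, hpc⟩ := List.mem_filter.mp hp
    obtain ⟨kv, hkv, he⟩ := List.mem_flatMap.mp hpmem
    obtain ⟨e, hev, hpe⟩ := List.mem_map.mp he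
    have hkey : p.2 = kv.1 := by rw [← hpe]
    have hx : p.1 = x := hpx
    have hcont : kv.1 ∈ technologies.map PySem.Str.lower := by
      rw [PySem.Set.contains_iff, PySem.Set.mem_ofList] at hpc
      exact hkey ▸ hpc
    obtain ⟨t, ht, hlow⟩ := List.mem_map.mp hcont
    refine List.mem_flatMap.mpr ⟨t, ht, ?_⟩
    exact (mem_getD_iff techItems (PySem.Str.lower t) x keys_nodup).mpr
      ⟨kv, hkv, hlow.symm, by rw [← hx, ← hpe]; exact hev⟩

-- ===== VERDICT (by name: the statement is the Claim_ definition above) =====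
theorem get_code_extensions_spec : Claim_equal_get_code_extensions := by
  intro technologies _
  unfold Spec_get_code_extensions get_code_extensions get_code_extensions_alt
  apply PySem.List.sorted_eq_sorted_of_perm _ _ _ (fun a b h => h)
  refine (List.perm_ext_iff_of_nodup (PySem.Set.nodup_ofList _) (PySem.Set.nodup_ofList _)).mpr ?_
  intro x
  have hA := extA_eq_flatMap technologies
  have hm := members_eq technologies x
  rw [← hA] at hm
  unfold techItems at hm
  rw [PySem.Set.mem_ofList, PySem.Set.mem_ofList]
  exact hm
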